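-- pv_equiv track=rewrite | github.com/Aumasf/Generador_de_Desglose | report_utils.py | _detectar_campos
-- ===== SOURCE A (Python) =====
-- def _detectar_campos(headers_norm):
--     # candidatos item
--     item_field = None
--     price_field = None
--
--     for h in headers_norm:
--         if item_field is None and (h in ("numero", "nro", "item", "ítem") or h.startswith("item") or "numero" in h):
--             item_field = h
--
--     # precio unitario referencial/estimado
--     for h in headers_norm:
--         if price_field is None and ("precio" in h and ("unit" in h or "unitario" in h)):
--             # si existe algo tipo estimado/referencial, priorizar
--             if any(k in h for k in ("estim", "refer", "ref")):
--                 price_field = h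
--
--     # fallback: el primero que cumpla precio+unitario
--     if price_field is None:
--         for h in headers_norm:
--             if "precio" in h and ("unit" in h or "unitario" in h):
--                 price_field = h
--                 break
--
--     return item_field, price_field
-- ===== SOURCE B (Python) =====
-- def _detectar_campos(headers_norm):
--     # Single pass maintaining three first-occurrence slots instead of three scans.
--     item_field = None
--     price_priority = None
--     price_fallback = None
--     for h in headers_norm:
--         if item_field is None and (h in ("numero", "nro", "item", "ítem") or h.startswith("item") or "numero" in h):
--             item_field = h
--         is_price = "precio" in h and ("unit" in h or "unitario" in h)
--         if price_priority is None and is_price and any(k in h for k in ("estim", "refer", "ref")):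
--             price_priority = h
--         if price_fallback is None and is_price:
--             price_fallback = h
--     price_field = price_priority if price_priority is not None else price_fallback
--     return item_field, price_field
-- ===== Notes on version B (the rewrite author's own statement) =====
-- stated objective: simpler
-- what changed: Replaces A's three sequential scans (item loop, priority price loop, fallback price loop with break) by one pass that maintains three first-occurrence slots and combines the two price slots after the loop.
import Mathlib
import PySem

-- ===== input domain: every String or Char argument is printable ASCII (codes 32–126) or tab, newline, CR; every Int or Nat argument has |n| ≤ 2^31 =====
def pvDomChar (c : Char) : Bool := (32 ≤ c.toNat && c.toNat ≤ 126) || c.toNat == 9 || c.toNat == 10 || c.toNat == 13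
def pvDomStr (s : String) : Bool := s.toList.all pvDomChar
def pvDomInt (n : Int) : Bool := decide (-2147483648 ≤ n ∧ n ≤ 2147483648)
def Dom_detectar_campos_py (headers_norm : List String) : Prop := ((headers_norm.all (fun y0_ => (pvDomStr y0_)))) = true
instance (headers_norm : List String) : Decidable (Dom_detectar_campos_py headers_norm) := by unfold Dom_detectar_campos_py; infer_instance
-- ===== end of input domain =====

-- ===== PORT A =====
-- B replaces A's three sequential scans by one pass maintaining three first-occurrence slots (objective: simpler).

-- h in ("numero", "nro", "item", "ítem") or h.startswith("item") or "numero" in h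
def pvItemHit (h : String) : Bool :=
  (h == "numero" || h == "nro" || h == "item" || h == "ítem")
    || PySem.Str.startswith h "item" || PySem.Str.isIn "numero" h

-- "precio" in h and ("unit" in h or "unitario" in h)
def pvPriceHit (h : String) : Bool :=
  PySem.Str.isIn "precio" h && (PySem.Str.isIn "unit" h || PySem.Str.isIn "unitario" h)

-- any(k in h for k in ("estim", "refer", "ref"))
def pvEstimHit (h : String) : Bool :=
  PySem.Str.isIn "estim" h || PySem.Str.isIn "refer" h || PySem.Str.isIn "ref" h

-- A's third loop: first header with precio+unit (loop with break)
def pvFindPrecio : List String → Option String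
  | [] => none
  | h :: t => if pvPriceHit h then some h else pvFindPrecio t

def detectar_campos_py (headers_norm : List String) : Option String × Option String :=
  let item_field := headers_norm.foldl
    (fun acc h => if acc.isNone && pvItemHit h then some h else acc) none
  let price_field := headers_norm.foldl
    (fun acc h =>
      if acc.isNone && pvPriceHit h then
        if pvEstimHit h then some h else acc
      else acc) none
  let price_field := if price_field.isNone then pvFindPrecio headers_norm else price_field
  (item_field, price_field)

-- ===== PORT B =====
def detectar_campos_py_alt (headers_norm : List String) : Option String × Option String :=
  let st := headers_norm.foldl
    (fun (s : Option String × Option String × Option String) h =>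
      (if s.1.isNone && pvItemHit h then some h else s.1,
       if s.2.1.isNone && (pvPriceHit h && pvEstimHit h) then some h else s.2.1,
       if s.2.2.isNone && pvPriceHit h then some h else s.2.2))
    (none, none, none)
  (st.1, if st.2.1.isSome then st.2.1 else st.2.2)

-- ===== PRECONDITION & SPEC =====
def Spec_detectar_campos_py (headers_norm : List String) (out : Option String × Option String) : Prop := out = detectar_campos_py_alt headers_norm
instance (headers_norm : List String) (out : Option String × Option String) : Decidable (Spec_detectar_campos_py headers_norm out) := by unfold Spec_detectar_campos_py; infer_instance

-- ===== CLAIM (what is proved, stated in full; the proofs are below) =====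
def Claim_equal_detectar_campos_py : Prop := ∀ (headers_norm : List String), Dom_detectar_campos_py headers_norm → Spec_detectar_campos_py headers_norm (detectar_campos_py headers_norm)

-- ===== LEMMAS AND PROOFS =====

-- ===== VERDICT (by name: the statement is the Claim_ definition above) =====
-- B's triple fold splits into three independent folds
theorem pvFold3_split (hs : List String) (a b c : Option String) :
    hs.foldl (fun (s : Option String × Option String × Option String) h =>
      (if s.1.isNone && pvItemHit h then some h else s.1,
       if s.2.1.isNone && (pvPriceHit h && pvEstimHit h) then some h else s.2.1,
       if s.2.2.isNone && pvPriceHit h then some h else s.2.2)) (a, b, c)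
    = (hs.foldl (fun acc h => if acc.isNone && pvItemHit h then some h else acc) a,
       hs.foldl (fun acc h => if acc.isNone && (pvPriceHit h && pvEstimHit h) then some h else acc) b,
       hs.foldl (fun acc h => if acc.isNone && pvPriceHit h then some h else acc) c) := by
  induction hs generalizing a b c with
  | nil => rfl
  | cons h t ih =>
    simp only [List.foldl_cons]
    exact ih _ _ _

-- A's second loop's step function equals B's combined-condition step
theorem pvPriceStep_eq :
    (fun (acc : Option String) h =>
      if acc.isNone && pvPriceHit h then
        if pvEstimHit h then some h else acc
      else acc)
    = (fun (acc : Option String) h => if acc.isNone && (pvPriceHit h && pvEstimHit h) then some h else acc) := by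
  funext acc h
  cases acc <;> by_cases hp : pvPriceHit h <;> by_cases he : pvEstimHit h <;> simp [hp, he]

-- the fallback fold computes A's break-loop
theorem pvFold_some (hs : List String) (x : String) :
    hs.foldl (fun acc h => if acc.isNone && pvPriceHit h then some h else acc) (some x) = some x := by
  induction hs with
  | nil => rfl
  | cons h t ih =>
    simp only [List.foldl_cons, Option.isNone_some, Bool.false_and, Bool.false_eq_true,
      if_false]
    exact ih

theorem pvFold_findPrecio (hs : List String) :
    hs.foldl (fun acc h => if acc.isNone && pvPriceHit h then some h else acc) none
    = pvFindPrecio hs := by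
  induction hs with
  | nil => rfl
  | cons h t ih =>
    simp only [List.foldl_cons, Option.isNone_none, Bool.true_and]
    by_cases hp : pvPriceHit h
    · rw [if_pos hp, pvFold_some, pvFindPrecio, if_pos hp]
    · rw [if_neg (by simp [hp]), ih, pvFindPrecio, if_neg hp]

theorem detectar_campos_py_spec : Claim_equal_detectar_campos_py := by
  intro hs _
  unfold Spec_detectar_campos_py detectar_campos_py detectar_campos_py_alt
  rw [pvFold3_split, ← pvFold_findPrecio, ← pvPriceStep_eq]
  cases hfold : hs.foldl (fun (acc : Option String) h =>
      if acc.isNone && pvPriceHit h then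
        if pvEstimHit h then some h else acc
      else acc) none <;> simp
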